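-- pv_equiv track=rewrite | github.com/mitsuo0114/competitive_programming | python/atcoder/Grand028/B.py | solve
-- ===== SOURCE A (Python) =====
-- from collections import Counter
-- from itertools import combinations
--
-- def solve(N, As):
--     data = {}
--     for i, a in enumerate(As):
--         data.setdefault(a, []).append(i)
--     d_pairs = []
--     counters = Counter()
--     keys = list(sorted(data.keys()))
--     for v in combinations(keys, 2):
--         if bin(v[0] + v[1]).count("1") == 1:
--             d_pairs.append((v[0], v[1]))
--             counters.update([v[0]] * len(data[v[0]]))
--             counters.update([v[1]] * len(data[v[1]]))
--     for v in keys: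
--         if bin(v * 2).count("1") == 1:
--             d_pairs.append((v, v))
--             counters.update([v] * len(data[v]))
--     cost = []
--     for p in d_pairs:
--         c1 = counters[p[0]] if bin(p[0]).count("1") != 1 else 10 ** 10
--         c2 = counters[p[1]] if bin(p[1]).count("1") != 1 else 10 ** 10
--         cost.append((c1 + c2, p[0], p[1]))
--
--     ans = 0
--     cost.sort()
--     for cost_pair in cost:
--         if cost_pair[1] != cost_pair[2]:
--             while len(data[cost_pair[1]]) > 0 and len(data[cost_pair[2]]) > 0:
--                 ans += 1
--                 data[cost_pair[1]].pop()
--                 data[cost_pair[2]].pop()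
--         else:
--             while len(data[cost_pair[1]]) > 1:
--                 ans += 1
--                 data[cost_pair[1]].pop()
--                 data[cost_pair[2]].pop()
--     return ans
-- ===== SOURCE B (Python) =====
-- from collections import Counter
--
--
-- def solve(N, As):
--     cnt = Counter(As)
--     keys = sorted(cnt)
--     pows = [1 << k for k in range(33)]
--     pows = pows + [-p for p in pows]
--     powset = set(pows)
--     # pair discovery: for each value probe every target sum +-2^k (k<=32 covers
--     # all sums of two 32-bit values) instead of scanning all key pairs
--     pairs = []
--     for a in keys:
--         for p in pows:
--             b = p - a
--             if b >= a and b in cnt: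
--                 pairs.append((a, b))
--     counters = Counter()
--     for a, b in pairs:
--         counters[a] += cnt[a]
--         if b != a:
--             counters[b] += cnt[b]
--     cost = sorted(((10 ** 10 if a in powset else counters[a])
--                    + (10 ** 10 if b in powset else counters[b]), a, b)
--                   for a, b in pairs)
--     ans = 0
--     for _, a, b in cost:
--         if a != b:
--             t = min(cnt[a], cnt[b])
--             ans += t
--             cnt[a] -= t
--             cnt[b] -= t
--         else:
--             t = cnt[a] // 2
--             ans += t
--             cnt[a] -= 2 * t
--     return ans
-- ===== Notes on version B (the rewrite author's own statement) =====
-- stated objective: faster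
-- what changed: B finds candidate pairs by probing, for each distinct value, the ~66 possible sums +-2^k (k<=32 covers any sum of two ints in the domain) in a hash set instead of scanning all O(K^2) key pairs, and replaces A's element-by-element while/pop consumption loops with O(1) counter arithmetic (min / floor-div) per matched pair.
import Mathlib
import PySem

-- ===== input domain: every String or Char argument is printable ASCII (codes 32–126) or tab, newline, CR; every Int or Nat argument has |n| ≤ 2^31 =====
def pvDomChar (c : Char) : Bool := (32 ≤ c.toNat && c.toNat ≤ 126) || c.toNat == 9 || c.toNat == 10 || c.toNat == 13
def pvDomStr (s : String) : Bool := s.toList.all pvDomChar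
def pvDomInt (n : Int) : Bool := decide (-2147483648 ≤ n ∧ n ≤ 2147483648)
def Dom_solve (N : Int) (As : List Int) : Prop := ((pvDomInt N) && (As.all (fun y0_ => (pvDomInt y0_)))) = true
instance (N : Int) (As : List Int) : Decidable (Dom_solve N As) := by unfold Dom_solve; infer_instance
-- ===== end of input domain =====

-- B replaces A's all-pairs scan over the distinct values by probing, for each value, the
-- ~66 candidate sums ±2^k (k ≤ 32 covers any sum of two ints of the input domain) in a hash
-- set, and replaces the element-by-element pop loops by counter arithmetic (objective: faster).

-- ===== PORT A =====
-- counters.update([v] * n)  (Counter.update over a repeated list: +1 per element)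
def pvUpdRep (c : PySem.Dict Int Int) (v : Int) (n : Int) : PySem.Dict Int Int :=
  (PySem.List.pyRepeat [v] n).foldl (fun d x => d.modify x 0 (fun y => y + 1)) c

-- "while len(data[a])>0 and len(data[b])>0: ans += 1; data[a].pop(); data[b].pop()"
-- (list.pop() removes the last element, its value is discarded; the keys a, b are always
-- present in the dict here, so the getD [] lookup is exact)
def pvDrain2 (d : PySem.Dict Int (List Int)) (a b : Int) (ans : Int) :
    PySem.Dict Int (List Int) × Int :=
  if h : 0 < (d.getD a []).length ∧ 0 < (d.getD b []).length then
    pvDrain2 ((d.insert a (d.getD a []).dropLast).insert b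
        (((d.insert a (d.getD a []).dropLast).getD b []).dropLast)) a b (ans + 1)
  else (d, ans)
termination_by (d.getD a []).length
decreasing_by
  have := h.1
  by_cases hba : b = a
  · subst hba
    simp only [PySem.Dict.getD_insert_self, List.length_dropLast]
    omega
  · simp only [PySem.Dict.getD_insert, if_neg (show ¬a = b from fun hc => hba hc.symm),
      if_true, List.length_dropLast]
    omega

-- "while len(data[a]) > 1: ans += 1; data[a].pop(); data[a].pop()"  (cost_pair[1] == cost_pair[2])
def pvDrain1 (d : PySem.Dict Int (List Int)) (a : Int) (ans : Int) :
    PySem.Dict Int (List Int) × Int :=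
  if h : 1 < (d.getD a []).length then
    pvDrain1 ((d.insert a (d.getD a []).dropLast).insert a
        (((d.insert a (d.getD a []).dropLast).getD a []).dropLast)) a (ans + 1)
  else (d, ans)
termination_by (d.getD a []).length
decreasing_by
  simp only [PySem.Dict.getD_insert_self, List.length_dropLast]
  omega

-- port of A; data.setdefault(a, []).append(i) is d.modify a [] (· ++ [i]) (append to the
-- entry, starting from [] when absent); cost.sort() on 3-tuples is the stable sort under
-- the lexicographic key toLex (c, toLex (p0, p1)) — exactly Python's tuple order; bin(x).count("1")
-- is PySem.Int.bitCount x (Python-exact on negatives)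
def solve (N : Int) (As : List Int) : Int :=
  let data : PySem.Dict Int (List Int) :=
    (PySem.List.enumerate As 0).foldl
      (fun d p => d.modify p.2 [] (fun l => l ++ [p.1])) PySem.Dict.empty
  let keys := PySem.List.sorted data.keys (fun x => x) false
  let st1 := (PySem.List.combinations keys 2).foldl
    (fun (st : List (Int × Int) × PySem.Dict Int Int) v =>
      if PySem.Int.bitCount (PySem.List.pyGetD v 0 0 + PySem.List.pyGetD v 1 0) = 1 then
        (st.1 ++ [(PySem.List.pyGetD v 0 0, PySem.List.pyGetD v 1 0)],
          pvUpdRep (pvUpdRep st.2 (PySem.List.pyGetD v 0 0)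
              (PySem.List.len (data.getD (PySem.List.pyGetD v 0 0) [])))
            (PySem.List.pyGetD v 1 0) (PySem.List.len (data.getD (PySem.List.pyGetD v 1 0) [])))
      else st)
    ([], PySem.Dict.empty)
  let st2 := keys.foldl
    (fun (st : List (Int × Int) × PySem.Dict Int Int) v =>
      if PySem.Int.bitCount (v * 2) = 1 then
        (st.1 ++ [(v, v)], pvUpdRep st.2 v (PySem.List.len (data.getD v [])))
      else st) st1
  let cost := st2.1.foldl
    (fun acc p =>
      acc ++ [((if PySem.Int.bitCount p.1 ≠ 1 then st2.2.getD p.1 0 else 10000000000) +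
               (if PySem.Int.bitCount p.2 ≠ 1 then st2.2.getD p.2 0 else 10000000000),
               p.1, p.2)]) []
  let costS := PySem.List.sorted cost (fun t => toLex (t.1, toLex t.2)) false
  (costS.foldl (fun (st : PySem.Dict Int (List Int) × Int) cp =>
      if cp.2.1 ≠ cp.2.2 then pvDrain2 st.1 cp.2.1 cp.2.2 st.2
      else pvDrain1 st.1 cp.2.1 st.2) (data, 0)).2

-- ===== PORT B =====
-- pows = [1 << k for k in range(33)]; pows = pows + [-p for p in pows]
def pvPows : List Int := (List.range 33).map (fun k : Nat => (1 : Int) <<< k)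
def pvAllPows : List Int := pvPows ++ pvPows.map (fun p => -p)

-- port of Source B; sorted(...) on 3-tuples under the same lexicographic key as in A's port
def solve_alt (N : Int) (As : List Int) : Int :=
  let cnt := PySem.Dict.counter As
  let keys := PySem.List.sorted cnt.keys (fun x => x) false
  -- b = p - a; if b >= a and b in cnt: pairs.append((a, b))    (b inlined)
  let pairs := keys.foldl
    (fun acc a => pvAllPows.foldl
      (fun acc p => if p - a ≥ a ∧ cnt.contains (p - a) then acc ++ [(a, p - a)] else acc)
      acc) []
  let counters := pairs.foldl
    (fun (c : PySem.Dict Int Int) pr =>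
      let c1 := c.modify pr.1 0 (fun x => x + cnt.getD pr.1 0)
      if pr.2 ≠ pr.1 then c1.modify pr.2 0 (fun x => x + cnt.getD pr.2 0) else c1)
    PySem.Dict.empty
  let powset := PySem.Set.ofList pvAllPows
  let cost := PySem.List.sorted
    (pairs.map (fun pr =>
      ((if PySem.Set.contains powset pr.1 then 10000000000 else counters.getD pr.1 0) +
       (if PySem.Set.contains powset pr.2 then 10000000000 else counters.getD pr.2 0),
       pr.1, pr.2)))
    (fun t => toLex (t.1, toLex t.2)) false
  (cost.foldl (fun (st : PySem.Dict Int Int × Int) t =>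
      if t.2.1 ≠ t.2.2 then
        let m := min (st.1.getD t.2.1 0) (st.1.getD t.2.2 0)
        (((st.1.modify t.2.1 0 (fun x => x - m)).modify t.2.2 0 (fun x => x - m)), st.2 + m)
      else
        let m := PySem.Int.floordiv (st.1.getD t.2.1 0) 2
        (st.1.modify t.2.1 0 (fun x => x - 2 * m), st.2 + m)) (cnt, 0)).2

-- ===== PRECONDITION & SPEC =====
def Spec_solve (N : Int) (As : List Int) (out : Int) : Prop := out = solve_alt N As
instance (N : Int) (As : List Int) (out : Int) : Decidable (Spec_solve N As out) := by
  unfold Spec_solve; infer_instance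

-- ===== CLAIM (what is proved, stated in full; the proofs are below) =====
def Claim_equal_solve : Prop := ∀ (N : Int) (As : List Int), Dom_solve N As → Spec_solve N As (solve N As)

-- ===== LEMMAS AND PROOFS =====

-- ---- proof-side mirrors of the two ports (staged; each `pv…_eq` below is definitional) ----

def pvData (As : List Int) : PySem.Dict Int (List Int) :=
  (PySem.List.enumerate As 0).foldl
    (fun d p => d.modify p.2 [] (fun l => l ++ [p.1])) PySem.Dict.empty

def pvKeysA (As : List Int) : List Int :=
  PySem.List.sorted (pvData As).keys (fun x => x) false

def pvSt1 (As : List Int) : List (Int × Int) × PySem.Dict Int Int :=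
  (PySem.List.combinations (pvKeysA As) 2).foldl
    (fun (st : List (Int × Int) × PySem.Dict Int Int) v =>
      if PySem.Int.bitCount (PySem.List.pyGetD v 0 0 + PySem.List.pyGetD v 1 0) = 1 then
        (st.1 ++ [(PySem.List.pyGetD v 0 0, PySem.List.pyGetD v 1 0)],
          pvUpdRep (pvUpdRep st.2 (PySem.List.pyGetD v 0 0)
              (PySem.List.len ((pvData As).getD (PySem.List.pyGetD v 0 0) [])))
            (PySem.List.pyGetD v 1 0)
            (PySem.List.len ((pvData As).getD (PySem.List.pyGetD v 1 0) [])))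
      else st)
    ([], PySem.Dict.empty)

def pvSt2 (As : List Int) : List (Int × Int) × PySem.Dict Int Int :=
  (pvKeysA As).foldl
    (fun (st : List (Int × Int) × PySem.Dict Int Int) v =>
      if PySem.Int.bitCount (v * 2) = 1 then
        (st.1 ++ [(v, v)], pvUpdRep st.2 v (PySem.List.len ((pvData As).getD v [])))
      else st) (pvSt1 As)

def pvCostA (As : List Int) : List (Int × Int × Int) :=
  (pvSt2 As).1.foldl
    (fun acc p =>
      acc ++ [((if PySem.Int.bitCount p.1 ≠ 1 then (pvSt2 As).2.getD p.1 0 else 10000000000) +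
               (if PySem.Int.bitCount p.2 ≠ 1 then (pvSt2 As).2.getD p.2 0 else 10000000000),
               p.1, p.2)]) []

def pvStepA (st : PySem.Dict Int (List Int) × Int) (cp : Int × Int × Int) :
    PySem.Dict Int (List Int) × Int :=
  if cp.2.1 ≠ cp.2.2 then pvDrain2 st.1 cp.2.1 cp.2.2 st.2 else pvDrain1 st.1 cp.2.1 st.2

theorem solve_eq (N : Int) (As : List Int) :
    solve N As =
      ((PySem.List.sorted (pvCostA As) (fun t => toLex (t.1, toLex t.2)) false).foldl
        pvStepA (pvData As, 0)).2 := rfl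

def pvKeysB (As : List Int) : List Int :=
  PySem.List.sorted (PySem.Dict.counter As).keys (fun x => x) false

def pvPairsB (As : List Int) : List (Int × Int) :=
  (pvKeysB As).foldl
    (fun acc a => pvAllPows.foldl
      (fun acc p =>
        if p - a ≥ a ∧ (PySem.Dict.counter As).contains (p - a) then acc ++ [(a, p - a)] else acc)
      acc) []

def pvCountersB (As : List Int) : PySem.Dict Int Int :=
  (pvPairsB As).foldl
    (fun (c : PySem.Dict Int Int) pr =>
      let c1 := c.modify pr.1 0 (fun x => x + (PySem.Dict.counter As).getD pr.1 0)
      if pr.2 ≠ pr.1 then c1.modify pr.2 0 (fun x => x + (PySem.Dict.counter As).getD pr.2 0)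
      else c1)
    PySem.Dict.empty

def pvCostB (As : List Int) : List (Int × Int × Int) :=
  (pvPairsB As).map (fun pr =>
    ((if PySem.Set.contains (PySem.Set.ofList pvAllPows) pr.1 then 10000000000
      else (pvCountersB As).getD pr.1 0) +
     (if PySem.Set.contains (PySem.Set.ofList pvAllPows) pr.2 then 10000000000
      else (pvCountersB As).getD pr.2 0),
     pr.1, pr.2))

def pvStepB (st : PySem.Dict Int Int × Int) (t : Int × Int × Int) : PySem.Dict Int Int × Int :=
  if t.2.1 ≠ t.2.2 then
    let m := min (st.1.getD t.2.1 0) (st.1.getD t.2.2 0)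
    (((st.1.modify t.2.1 0 (fun x => x - m)).modify t.2.2 0 (fun x => x - m)), st.2 + m)
  else
    let m := PySem.Int.floordiv (st.1.getD t.2.1 0) 2
    (st.1.modify t.2.1 0 (fun x => x - 2 * m), st.2 + m)

theorem solve_alt_eq (N : Int) (As : List Int) :
    solve_alt N As =
      ((PySem.List.sorted (pvCostB As) (fun t => toLex (t.1, toLex t.2)) false).foldl
        pvStepB (PySem.Dict.counter As, 0)).2 := rfl

-- ---- the drained while-loops, in closed form ----

theorem pvDrain2_spec (a b : Int) (hab : a ≠ b) :
    ∀ (d : PySem.Dict Int (List Int)) (ans : Int),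
      (pvDrain2 d a b ans).2
          = ans + ((min (d.getD a []).length (d.getD b []).length : Nat) : Int)
        ∧ ∀ k, ((pvDrain2 d a b ans).1.getD k []).length
          = (d.getD k []).length -
              (if k = a ∨ k = b then min (d.getD a []).length (d.getD b []).length else 0) := by
  suffices H : ∀ n (d : PySem.Dict Int (List Int)) (ans : Int), (d.getD a []).length = n →
      (pvDrain2 d a b ans).2
          = ans + ((min (d.getD a []).length (d.getD b []).length : Nat) : Int)
        ∧ ∀ k, ((pvDrain2 d a b ans).1.getD k []).length
          = (d.getD k []).length -
              (if k = a ∨ k = b then min (d.getD a []).length (d.getD b []).length else 0) by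
    exact fun d ans => H _ d ans rfl
  intro n
  induction n using Nat.strong_induction_on with
  | _ n IH =>
    intro d ans hn
    by_cases hc : 0 < (d.getD a []).length ∧ 0 < (d.getD b []).length
    · rw [pvDrain2, dif_pos hc]
      have hba : b ≠ a := Ne.symm hab
      set d2 := ((d.insert a (d.getD a []).dropLast).insert b
          (((d.insert a (d.getD a []).dropLast).getD b []).dropLast)) with hd2
      have h2a : d2.getD a [] = (d.getD a []).dropLast := by
        rw [hd2, PySem.Dict.getD_insert_of_ne _ _ _ hab, PySem.Dict.getD_insert_self]
      have h2b : d2.getD b [] = (d.getD b []).dropLast := by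
        rw [hd2, PySem.Dict.getD_insert_self, PySem.Dict.getD_insert_of_ne _ _ _ hba]
      have h2k : ∀ k, k ≠ a → k ≠ b → d2.getD k [] = d.getD k [] := by
        intro k hka hkb
        rw [hd2, PySem.Dict.getD_insert_of_ne _ _ _ hkb, PySem.Dict.getD_insert_of_ne _ _ _ hka]
      obtain ⟨ih1, ih2⟩ := IH ((d.getD a []).length - 1) (by omega) d2 (ans + 1)
        (by rw [h2a, List.length_dropLast])
      constructor
      · rw [ih1, h2a, h2b, List.length_dropLast, List.length_dropLast]
        have h1 := hc.1; have h2 := hc.2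
        push_cast
        omega
      · intro k
        rw [ih2 k, h2a, h2b, List.length_dropLast, List.length_dropLast]
        by_cases hka : k = a
        · subst hka
          rw [h2a, List.length_dropLast]
          have h1 := hc.1; have h2 := hc.2
          simp only [eq_self_iff_true, true_or, if_true]
          omega
        · by_cases hkb : k = b
          · subst hkb
            rw [h2b, List.length_dropLast]
            have h1 := hc.1; have h2 := hc.2
            simp only [eq_self_iff_true, or_true, if_true]
            omega
          · rw [h2k k hka hkb]
            simp only [if_neg (by tauto : ¬(k = a ∨ k = b))]
    · rw [pvDrain2, dif_neg hc]
      have : min (d.getD a []).length (d.getD b []).length = 0 := by omega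
      rw [this]
      refine ⟨by simp, fun k => by simp⟩

theorem pvDrain1_spec (a : Int) :
    ∀ (d : PySem.Dict Int (List Int)) (ans : Int),
      (pvDrain1 d a ans).2 = ans + (((d.getD a []).length / 2 : Nat) : Int)
        ∧ ∀ k, ((pvDrain1 d a ans).1.getD k []).length
          = (d.getD k []).length - (if k = a then 2 * ((d.getD a []).length / 2) else 0) := by
  suffices H : ∀ n (d : PySem.Dict Int (List Int)) (ans : Int), (d.getD a []).length = n →
      (pvDrain1 d a ans).2 = ans + (((d.getD a []).length / 2 : Nat) : Int)
        ∧ ∀ k, ((pvDrain1 d a ans).1.getD k []).length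
          = (d.getD k []).length - (if k = a then 2 * ((d.getD a []).length / 2) else 0) by
    exact fun d ans => H _ d ans rfl
  intro n
  induction n using Nat.strong_induction_on with
  | _ n IH =>
    intro d ans hn
    by_cases hc : 1 < (d.getD a []).length
    · rw [pvDrain1, dif_pos hc]
      set d2 := ((d.insert a (d.getD a []).dropLast).insert a
          (((d.insert a (d.getD a []).dropLast).getD a []).dropLast)) with hd2
      have h2a : d2.getD a [] = (d.getD a []).dropLast.dropLast := by
        rw [hd2, PySem.Dict.getD_insert_self, PySem.Dict.getD_insert_self]
      have h2k : ∀ k, k ≠ a → d2.getD k [] = d.getD k [] := by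
        intro k hka
        rw [hd2, PySem.Dict.getD_insert_of_ne _ _ _ hka, PySem.Dict.getD_insert_of_ne _ _ _ hka]
      obtain ⟨ih1, ih2⟩ := IH ((d.getD a []).length - 2) (by omega) d2 (ans + 1)
        (by rw [h2a]; simp only [List.length_dropLast]; omega)
      constructor
      · rw [ih1, h2a]
        simp only [List.length_dropLast]
        push_cast
        omega
      · intro k
        rw [ih2 k, h2a]
        simp only [List.length_dropLast]
        by_cases hka : k = a
        · subst hka
          rw [h2a]
          simp only [List.length_dropLast, eq_self_iff_true, if_true]
          omega
        · rw [h2k k hka]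
          simp only [if_neg hka]
    · rw [pvDrain1, dif_neg hc]
      have : (d.getD a []).length / 2 = 0 := by omega
      rw [this]
      refine ⟨by simp, fun k => by simp⟩

-- the two greedy folds agree whenever the count dict mirrors the index-list lengths
theorem pvFold_eq (L : List (Int × Int × Int)) :
    ∀ (d : PySem.Dict Int (List Int)) (c : PySem.Dict Int Int) (ans : Int),
      (∀ k, (((d.getD k []).length : Nat) : Int) = c.getD k 0) →
      (L.foldl pvStepA (d, ans)).2 = (L.foldl pvStepB (c, ans)).2 := by
  induction L with
  | nil => intro d c ans _; rfl
  | cons t L IH =>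
    intro d c ans inv
    simp only [List.foldl_cons]
    by_cases hab : t.2.1 = t.2.2
    · -- equal endpoints: pvDrain1 vs counter arithmetic
      have hm : PySem.Int.floordiv (c.getD t.2.1 0) 2 = (((d.getD t.2.1 []).length / 2 : Nat) : Int) := by
        rw [← inv t.2.1]
        exact_mod_cast PySem.Int.floordiv_natCast (d.getD t.2.1 []).length 2
      obtain ⟨e1, e2⟩ := pvDrain1_spec t.2.1 d ans
      have hA : pvStepA (d, ans) t
          = ((pvDrain1 d t.2.1 ans).1, ans + (((d.getD t.2.1 []).length / 2 : Nat) : Int)) := by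
        rw [pvStepA, if_neg (by simpa using hab)]
        exact Prod.ext rfl e1
      have hB : pvStepB (c, ans) t
          = (c.modify t.2.1 0 (fun x => x - 2 * (((d.getD t.2.1 []).length / 2 : Nat) : Int)),
             ans + (((d.getD t.2.1 []).length / 2 : Nat) : Int)) := by
        rw [pvStepB, if_neg (by simpa using hab)]
        simp only [hm]
      rw [hA, hB]
      refine IH _ _ _ ?_
      intro k
      have ik := inv k; have i1 := inv t.2.1
      rw [e2 k]
      simp only [PySem.Dict.getD_modify]
      by_cases hk : k = t.2.1
      · subst hk
        simp only [eq_self_iff_true, if_true]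
        omega
      · simp only [if_neg hk]
        omega
    · -- distinct endpoints: pvDrain2 vs counter arithmetic
      have hne : t.2.1 ≠ t.2.2 := hab
      have hm : min (c.getD t.2.1 0) (c.getD t.2.2 0)
          = ((min (d.getD t.2.1 []).length (d.getD t.2.2 []).length : Nat) : Int) := by
        rw [← inv t.2.1, ← inv t.2.2]
        push_cast
        rfl
      obtain ⟨e1, e2⟩ := pvDrain2_spec t.2.1 t.2.2 hne d ans
      have hA : pvStepA (d, ans) t
          = ((pvDrain2 d t.2.1 t.2.2 ans).1,
             ans + ((min (d.getD t.2.1 []).length (d.getD t.2.2 []).length : Nat) : Int)) := by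
        rw [pvStepA, if_pos hne]
        exact Prod.ext rfl e1
      have hB : pvStepB (c, ans) t
          = ((c.modify t.2.1 0 (fun x => x - ((min (d.getD t.2.1 []).length (d.getD t.2.2 []).length : Nat) : Int))).modify
                t.2.2 0 (fun x => x - ((min (d.getD t.2.1 []).length (d.getD t.2.2 []).length : Nat) : Int)),
             ans + ((min (d.getD t.2.1 []).length (d.getD t.2.2 []).length : Nat) : Int)) := by
        rw [pvStepB, if_pos hne]
        simp only [hm]
      rw [hA, hB]
      refine IH _ _ _ ?_
      intro k
      have ik := inv k; have i1 := inv t.2.1; have i2 := inv t.2.2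
      rw [e2 k]
      simp only [PySem.Dict.getD_modify]
      by_cases hkb : k = t.2.2
      · subst hkb
        simp only [eq_self_iff_true, or_true, if_true, if_neg (Ne.symm hne)]
        omega
      · by_cases hka : k = t.2.1
        · subst hka
          simp only [eq_self_iff_true, true_or, if_true, if_neg hne, if_neg hkb]
          omega
        · simp only [if_neg hka, if_neg hkb,
            if_neg (show ¬(k = t.2.1 ∨ k = t.2.2) from by tauto)]
          omega

-- ---- bin(x).count("1") == 1  ↔  |x| is a power of two  ↔  x ∈ pvAllPows (for |x| ≤ 2^32) ----

theorem pvBitCount_pos : ∀ m : Nat, 0 < m → 0 < PySem.Int.bitCount (m : Int) := by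
  intro m
  induction m using Nat.strong_induction_on with
  | _ m IH =>
    intro hm
    rw [PySem.Int.bitCount_natCast hm]
    by_cases hodd : m % 2 = 1
    · omega
    · have := IH (m / 2) (by omega) (by omega)
      omega

theorem pvBitCount_one_iff : ∀ m : Nat, (PySem.Int.bitCount (m : Int) = 1 ↔ ∃ k, m = 2 ^ k) := by
  intro m
  induction m using Nat.strong_induction_on with
  | _ m IH =>
    rcases Nat.eq_zero_or_pos m with h0 | hm
    · subst h0
      constructor
      · intro h
        exact absurd h (by decide)
      · rintro ⟨k, hk⟩
        have : 0 < 2 ^ k := Nat.two_pow_pos k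
        omega
    · rw [PySem.Int.bitCount_natCast hm]
      by_cases hodd : m % 2 = 1
      · by_cases h1 : m = 1
        · subst h1
          norm_num
          exact ⟨0, rfl⟩
        · have hp : 0 < PySem.Int.bitCount ((m / 2 : Nat) : Int) := pvBitCount_pos _ (by omega)
          constructor
          · intro h
            omega
          · rintro ⟨k, hk⟩
            exfalso
            cases k with
            | zero => simp at hk; omega
            | succ k =>
              have : m = 2 * 2 ^ k := by rw [hk]; ring
              omega
      · have h2 : m % 2 = 0 := by omega
        rw [h2, Nat.zero_add, IH (m / 2) (by omega)]
        constructor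
        · rintro ⟨k, hk⟩
          have hm2 : m = 2 * (m / 2) := by omega
          exact ⟨k + 1, by rw [hm2, hk]; ring⟩
        · rintro ⟨k, hk⟩
          cases k with
          | zero => simp at hk; omega
          | succ k =>
            refine ⟨k, ?_⟩
            have : m = 2 * 2 ^ k := by rw [hk]; ring
            omega

theorem pvBitCount_int (s : Int) : PySem.Int.bitCount s = 1 ↔ ∃ k, s.natAbs = 2 ^ k := by
  rcases Int.natAbs_eq s with h | h
  · conv_lhs => rw [h]
    exact pvBitCount_one_iff s.natAbs
  · conv_lhs => rw [h, PySem.Int.bitCount_neg]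
    exact pvBitCount_one_iff s.natAbs

theorem pvPows_eq : pvPows = (List.range 33).map (fun k : Nat => (2:Int) ^ k) := by
  simp [pvPows, Int.shiftLeft_eq]

theorem pvMem_allPows (s : Int) : s ∈ pvAllPows ↔ ∃ k, k < 33 ∧ s.natAbs = 2 ^ k := by
  simp only [pvAllPows, pvPows_eq, List.mem_append, List.mem_map, List.mem_range]
  constructor
  · rintro (⟨k, hk, rfl⟩ | ⟨p, ⟨k, hk, rfl⟩, rfl⟩)
    · exact ⟨k, hk, by rw [Int.natAbs_pow]; rfl⟩
    · exact ⟨k, hk, by rw [Int.natAbs_neg, Int.natAbs_pow]; rfl⟩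
  · rintro ⟨k, hk, habs⟩
    rcases Int.natAbs_eq s with h | h
    · left
      exact ⟨k, hk, by rw [h, habs]; push_cast; rfl⟩
    · right
      exact ⟨2 ^ k, ⟨k, hk, rfl⟩, by rw [h, habs]; push_cast; rfl⟩

theorem pvBit_mem (s : Int) (hb : s.natAbs ≤ 2 ^ 32) :
    PySem.Int.bitCount s = 1 ↔ s ∈ pvAllPows := by
  rw [pvBitCount_int, pvMem_allPows]
  constructor
  · rintro ⟨k, hk⟩
    refine ⟨k, ?_, hk⟩
    have : (2:Nat) ^ k ≤ 2 ^ 32 := hk ▸ hb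
    have := (Nat.pow_le_pow_iff_right (by omega : 1 < 2)).mp this
    omega
  · rintro ⟨k, _, hk⟩
    exact ⟨k, hk⟩

-- ---- stage 1: the grouping dict and the key list ----

theorem pvFoldSwap (l : List (Int × Int)) (d : PySem.Dict Int (List Int)) :
    l.foldl (fun d p => d.modify p.2 [] (fun t => t ++ [p.1])) d
      = (l.map (fun p => (p.2, p.1))).foldl
          (fun d p => d.modify p.1 [] (fun t => t ++ [p.2])) d := by
  induction l generalizing d with
  | nil => rfl
  | cons a t ih => simp only [List.map_cons, List.foldl_cons, ih]

theorem pvData_getD_len (As : List Int) (x : Int) :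
    ((pvData As).getD x []).length = As.count x := by
  rw [pvData, pvFoldSwap, PySem.Dict.getD_foldl_modify_append]
  simp only [PySem.Dict.getD_empty, List.nil_append, List.length_map]
  conv_rhs => rw [← PySem.List.map_snd_enumerate As 0]
  rw [← List.countP_eq_length_filter, List.count_eq_countP, List.countP_map, List.countP_map]
  rfl

theorem pvData_keys (As : List Int) : (pvData As).keys = PySem.Set.ofList As := by
  rw [pvData, pvFoldSwap, PySem.Dict.keys_foldl_modify_key ((PySem.List.enumerate As 0).map
    (fun p => (p.2, p.1))) (fun p => p.1) [] (fun _ p => fun t => t ++ [p.2])]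
  simp only [List.map_map, Function.comp_def, PySem.Dict.keys_empty]
  rw [show ((PySem.List.enumerate As 0).map (fun p => (p.2, p.1).1)) = As from
    PySem.List.map_snd_enumerate As 0]
  rfl

theorem pvKeysA_eq (As : List Int) :
    pvKeysA As = PySem.List.sorted (PySem.Set.ofList As) (fun x => x) false := by
  rw [pvKeysA, pvData_keys]

theorem pvKeysB_eq (As : List Int) :
    pvKeysB As = PySem.List.sorted (PySem.Set.ofList As) (fun x => x) false := by
  rw [pvKeysB, PySem.Dict.keys_counter]

-- ---- stage 2: counter updates in closed form ----

theorem pvUpdRep_getD (c : PySem.Dict Int Int) (v n x : Int) (hn : 0 ≤ n) :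
    (pvUpdRep c v n).getD x 0 = c.getD x 0 + if x = v then n else 0 := by
  rw [pvUpdRep, PySem.List.pyRepeat_singleton, PySem.Dict.getD_foldl_modify_add_one,
    List.count_replicate]
  split_ifs with h1 h2 h2 <;> simp_all <;> omega

theorem pvUpd2_getD (m : Int → Int) (hm : ∀ y, 0 ≤ m y) (ps : List (Int × Int)) :
    ∀ (c : PySem.Dict Int Int) (x : Int),
      (ps.foldl (fun s pr => pvUpdRep (pvUpdRep s pr.1 (m pr.1)) pr.2 (m pr.2)) c).getD x 0
        = c.getD x 0 + (ps.map (fun pr =>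
            (if x = pr.1 then m pr.1 else 0) + (if x = pr.2 then m pr.2 else 0))).sum := by
  induction ps with
  | nil => intro c x; simp
  | cons pr t ih =>
    intro c x
    simp only [List.foldl_cons, List.map_cons, List.sum_cons, ih,
      pvUpdRep_getD _ _ _ _ (hm _)]
    ring

theorem pvUpd1_getD (m : Int → Int) (hm : ∀ y, 0 ≤ m y) (vs : List Int) :
    ∀ (c : PySem.Dict Int Int) (x : Int),
      (vs.foldl (fun s v => pvUpdRep s v (m v)) c).getD x 0
        = c.getD x 0 + (vs.map (fun v => if x = v then m v else 0)).sum := by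
  induction vs with
  | nil => intro c x; simp
  | cons v t ih =>
    intro c x
    simp only [List.foldl_cons, List.map_cons, List.sum_cons, ih,
      pvUpdRep_getD _ _ _ _ (hm _)]
    ring

theorem pvUpdB_getD (m : Int → Int) (ps : List (Int × Int)) :
    ∀ (c : PySem.Dict Int Int) (x : Int),
      (ps.foldl (fun c pr =>
          let c1 := c.modify pr.1 0 (fun y => y + m pr.1)
          if pr.2 ≠ pr.1 then c1.modify pr.2 0 (fun y => y + m pr.2) else c1) c).getD x 0
        = c.getD x 0 + (ps.map (fun pr =>
            (if x = pr.1 then m pr.1 else 0) +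
            (if pr.2 ≠ pr.1 ∧ x = pr.2 then m pr.2 else 0))).sum := by
  induction ps with
  | nil => intro c x; simp
  | cons pr t ih =>
    intro c x
    simp only [List.foldl_cons, List.map_cons, List.sum_cons, ih]
    by_cases hd : pr.2 ≠ pr.1
    · simp only [if_pos hd, PySem.Dict.getD_modify]
      split_ifs <;> simp_all <;> ring
    · simp only [if_neg hd, PySem.Dict.getD_modify]
      split_ifs <;> simp_all <;> ring

-- ---- stage 3: the candidate-pair lists of both ports ----

theorem pvFoldProd {α L C : Type} (l : List α) (c : α → Prop) [DecidablePred c]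
    (f : L → α → L) (g : C → α → C) (i1 : L) (i2 : C) :
    l.foldl (fun st x => if c x then (f st.1 x, g st.2 x) else st) (i1, i2)
      = (l.foldl (fun s x => if c x then f s x else s) i1,
         l.foldl (fun s x => if c x then g s x else s) i2) := by
  induction l generalizing i1 i2 with
  | nil => rfl
  | cons a t ih =>
    simp only [List.foldl_cons]
    split_ifs <;> rw [ih]

def pvPairOf (v : List Int) : Int × Int := (PySem.List.pyGetD v 0 0, PySem.List.pyGetD v 1 0)

def pvMA (As : List Int) (y : Int) : Int := PySem.List.len ((pvData As).getD y [])

theorem pvMA_eq (As : List Int) (y : Int) : pvMA As y = (As.count y : Int) := by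
  rw [pvMA, PySem.List.len_eq, pvData_getD_len]

def pvCombosF (As : List Int) : List (List Int) :=
  (PySem.List.combinations (pvKeysA As) 2).filter
    (fun v => decide (PySem.Int.bitCount (PySem.List.pyGetD v 0 0 + PySem.List.pyGetD v 1 0) = 1))

def pvPairsOff (As : List Int) : List (Int × Int) := (pvCombosF As).map pvPairOf

def pvKeysF (As : List Int) : List Int :=
  (pvKeysA As).filter (fun v => decide (PySem.Int.bitCount (v * 2) = 1))

def pvPairsA (As : List Int) : List (Int × Int) :=
  pvPairsOff As ++ (pvKeysF As).map (fun v => (v, v))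

theorem pvSt1_eq (As : List Int) :
    pvSt1 As =
      ((PySem.List.combinations (pvKeysA As) 2).foldl
        (fun s v => if PySem.Int.bitCount (PySem.List.pyGetD v 0 0 + PySem.List.pyGetD v 1 0) = 1
          then s ++ [pvPairOf v] else s) [],
       (PySem.List.combinations (pvKeysA As) 2).foldl
        (fun s v => if PySem.Int.bitCount (PySem.List.pyGetD v 0 0 + PySem.List.pyGetD v 1 0) = 1
          then pvUpdRep (pvUpdRep s (PySem.List.pyGetD v 0 0) (pvMA As (PySem.List.pyGetD v 0 0)))
            (PySem.List.pyGetD v 1 0) (pvMA As (PySem.List.pyGetD v 1 0)) else s)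
        PySem.Dict.empty) :=
  pvFoldProd (PySem.List.combinations (pvKeysA As) 2)
    (fun v => PySem.Int.bitCount (PySem.List.pyGetD v 0 0 + PySem.List.pyGetD v 1 0) = 1)
    (fun s v => s ++ [pvPairOf v])
    (fun s v => pvUpdRep (pvUpdRep s (PySem.List.pyGetD v 0 0) (pvMA As (PySem.List.pyGetD v 0 0)))
      (PySem.List.pyGetD v 1 0) (pvMA As (PySem.List.pyGetD v 1 0)))
    [] PySem.Dict.empty

theorem pvSt2_eq (As : List Int) :
    pvSt2 As =
      ((pvKeysA As).foldl
        (fun s v => if PySem.Int.bitCount (v * 2) = 1 then s ++ [(v, v)] else s) (pvSt1 As).1,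
       (pvKeysA As).foldl
        (fun s v => if PySem.Int.bitCount (v * 2) = 1 then pvUpdRep s v (pvMA As v) else s)
        (pvSt1 As).2) := by
  rw [pvSt2, ← Prod.mk.eta (p := pvSt1 As)]
  exact pvFoldProd (pvKeysA As) (fun v : Int => PySem.Int.bitCount (v * 2) = 1)
    (fun s v => s ++ [(v, v)]) (fun s v => pvUpdRep s v (pvMA As v))
    (pvSt1 As).1 (pvSt1 As).2

theorem pvSt1_fst (As : List Int) : (pvSt1 As).1 = pvPairsOff As := by
  rw [pvSt1_eq]
  rw [PySem.List.foldl_append_ite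
    (fun v => PySem.Int.bitCount (PySem.List.pyGetD v 0 0 + PySem.List.pyGetD v 1 0) = 1)
    pvPairOf]
  rfl

theorem pvSt2_fst (As : List Int) : (pvSt2 As).1 = pvPairsA As := by
  rw [pvSt2_eq]
  show (pvKeysA As).foldl _ (pvSt1 As).1 = _
  rw [pvSt1_fst,
    PySem.List.foldl_append_ite (fun v : Int => PySem.Int.bitCount (v * 2) = 1) (fun v => (v, v))]
  rfl

theorem pvSt1_snd (As : List Int) :
    (pvSt1 As).2 = (pvPairsOff As).foldl
      (fun s pr => pvUpdRep (pvUpdRep s pr.1 (pvMA As pr.1)) pr.2 (pvMA As pr.2))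
      PySem.Dict.empty := by
  rw [pvSt1_eq]
  show (PySem.List.combinations (pvKeysA As) 2).foldl _ PySem.Dict.empty = _
  rw [PySem.List.foldl_ite_eq_foldl_filter
    (fun v => PySem.Int.bitCount (PySem.List.pyGetD v 0 0 + PySem.List.pyGetD v 1 0) = 1)]
  rw [pvPairsOff, List.foldl_map]
  rfl

theorem pvSt2_snd (As : List Int) :
    (pvSt2 As).2 = (pvKeysF As).foldl
      (fun s v => pvUpdRep s v (pvMA As v)) (pvSt1 As).2 := by
  rw [pvSt2_eq]
  show (pvKeysA As).foldl _ (pvSt1 As).2 = _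
  rw [PySem.List.foldl_ite_eq_foldl_filter (fun v : Int => PySem.Int.bitCount (v * 2) = 1)]
  rfl

theorem pvCountersA_getD (As : List Int) (x : Int) :
    (pvSt2 As).2.getD x 0
      = ((pvPairsOff As).map (fun pr =>
            (if x = pr.1 then pvMA As pr.1 else 0) + (if x = pr.2 then pvMA As pr.2 else 0))).sum
        + ((pvKeysF As).map (fun v => if x = v then pvMA As v else 0)).sum := by
  have hm : ∀ y, 0 ≤ pvMA As y := by
    intro y
    rw [pvMA_eq]
    positivity
  rw [pvSt2_snd, pvUpd1_getD (pvMA As) hm, pvSt1_snd, pvUpd2_getD (pvMA As) hm]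
  simp [PySem.Dict.getD_empty]

-- ---- stage 4: membership and uniqueness of the candidate pairs ----

theorem pvKeysA_pairwise (As : List Int) : (pvKeysA As).Pairwise (· < ·) := by
  rw [pvKeysA_eq]
  exact PySem.List.sorted_ofList_pairwise_lt As

theorem pvKeysA_nodup (As : List Int) : (pvKeysA As).Nodup :=
  (pvKeysA_pairwise As).imp (fun h => ne_of_lt h)

theorem pvKeysA_mem (As : List Int) (y : Int) : y ∈ pvKeysA As ↔ y ∈ As := by
  rw [pvKeysA_eq, PySem.List.mem_sorted, PySem.Set.mem_ofList]

theorem pvSublist2 (ks : List Int) (hs : ks.Pairwise (· < ·)) (a b : Int) :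
    [a, b].Sublist ks ↔ a ∈ ks ∧ b ∈ ks ∧ a < b := by
  constructor
  · intro h
    have hp : [a, b].Pairwise (· < ·) := hs.sublist h
    exact ⟨h.subset (by simp), h.subset (by simp), by simpa using hp⟩
  · rintro ⟨ha, hb, hab⟩
    induction ks with
    | nil => cases ha
    | cons x t ih =>
      have hx : ∀ y ∈ t, x < y := fun y hy => List.rel_of_pairwise_cons hs hy
      rcases List.mem_cons.mp ha with rfl | hat
      · have hbt : b ∈ t := by
          rcases List.mem_cons.mp hb with rfl | h
          · omega
          · exact h
        exact (List.singleton_sublist.mpr hbt).cons₂ a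
      · have hbt : b ∈ t := by
          rcases List.mem_cons.mp hb with rfl | h
          · have := hx a hat; omega
          · exact h
        exact (ih (List.Pairwise.of_cons hs) hat hbt).cons x

theorem pvCombos2_nodup : ∀ ks : List Int, ks.Nodup → (PySem.List.combinations ks 2).Nodup := by
  intro ks
  induction ks with
  | nil => intro _; rw [show (2:Nat) = 1 + 1 from rfl, PySem.List.combinations_nil_succ]; exact List.nodup_nil
  | cons x t ih =>
    intro h
    rw [show (2:Nat) = 1 + 1 from rfl, PySem.List.combinations_cons_succ,
      PySem.List.combinations_one]
    refine List.Nodup.append ?_ (ih h.of_cons) ?_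
    · rw [List.map_map]
      exact h.of_cons.map (fun y z hyz => by simpa using hyz)
    · intro l hl1 hl2
      rw [List.map_map] at hl1
      obtain ⟨y, _, rfl⟩ := List.mem_map.mp hl1
      have hsub := ((PySem.List.mem_combinations_iff _ _ _).mp hl2).1
      have hxmem : x ∈ t := hsub.subset (by simp)
      exact (List.nodup_cons.mp h).1 hxmem

theorem pvMem_combos2 (As : List Int) (v : List Int) :
    v ∈ PySem.List.combinations (pvKeysA As) 2
      ↔ ∃ a b, a ∈ As ∧ b ∈ As ∧ a < b ∧ v = [a, b] := by
  rw [PySem.List.mem_combinations_iff]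
  constructor
  · rintro ⟨hsub, hlen⟩
    obtain ⟨a, b, rfl⟩ := List.length_eq_two.mp hlen
    have := (pvSublist2 _ (pvKeysA_pairwise As) a b).mp hsub
    exact ⟨a, b, (pvKeysA_mem As a).mp this.1, (pvKeysA_mem As b).mp this.2.1, this.2.2, rfl⟩
  · rintro ⟨a, b, ha, hb, hab, rfl⟩
    exact ⟨(pvSublist2 _ (pvKeysA_pairwise As) a b).mpr
      ⟨(pvKeysA_mem As a).mpr ha, (pvKeysA_mem As b).mpr hb, hab⟩, rfl⟩

theorem pvPairOf_pair (a b : Int) : pvPairOf [a, b] = (a, b) := rfl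

theorem pvPairsOff_mem (As : List Int) (pr : Int × Int) :
    pr ∈ pvPairsOff As
      ↔ pr.1 ∈ As ∧ pr.2 ∈ As ∧ pr.1 < pr.2 ∧ PySem.Int.bitCount (pr.1 + pr.2) = 1 := by
  rw [pvPairsOff, List.mem_map]
  constructor
  · rintro ⟨v, hv, rfl⟩
    obtain ⟨hv1, hv2⟩ := List.mem_filter.mp hv
    obtain ⟨a, b, ha, hb, hab, rfl⟩ := (pvMem_combos2 As v).mp hv1
    rw [pvPairOf_pair]
    refine ⟨ha, hb, hab, by simpa [pvPairOf_pair] using of_decide_eq_true hv2⟩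
  · rintro ⟨h1, h2, h3, h4⟩
    refine ⟨[pr.1, pr.2], List.mem_filter.mpr ⟨(pvMem_combos2 As _).mpr
      ⟨pr.1, pr.2, h1, h2, h3, rfl⟩, decide_eq_true (by simpa using h4)⟩, rfl⟩

theorem pvPairsOff_lt (As : List Int) (pr : Int × Int) (h : pr ∈ pvPairsOff As) :
    pr.1 < pr.2 := ((pvPairsOff_mem As pr).mp h).2.2.1

theorem pvPairsOff_nodup (As : List Int) : (pvPairsOff As).Nodup := by
  rw [pvPairsOff]
  refine List.Nodup.map_on ?_ ((pvCombos2_nodup _ (pvKeysA_nodup As)).filter _)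
  intro v hv w hw hvw
  obtain ⟨a, b, _, _, _, rfl⟩ := (pvMem_combos2 As v).mp (List.mem_filter.mp hv).1
  obtain ⟨a', b', _, _, _, rfl⟩ := (pvMem_combos2 As w).mp (List.mem_filter.mp hw).1
  rw [pvPairOf_pair, pvPairOf_pair] at hvw
  obtain ⟨h1, h2⟩ := Prod.mk.injEq .. ▸ hvw
  simp_all

theorem pvKeysF_mem (As : List Int) (v : Int) :
    v ∈ pvKeysF As ↔ v ∈ As ∧ PySem.Int.bitCount (v * 2) = 1 := by
  rw [pvKeysF, List.mem_filter, pvKeysA_mem]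
  simp

theorem pvPairsA_mem (As : List Int) (pr : Int × Int) :
    pr ∈ pvPairsA As
      ↔ pr.1 ∈ As ∧ pr.2 ∈ As ∧ pr.1 ≤ pr.2 ∧ PySem.Int.bitCount (pr.1 + pr.2) = 1 := by
  rw [pvPairsA, List.mem_append, pvPairsOff_mem, List.mem_map]
  constructor
  · rintro (⟨h1, h2, h3, h4⟩ | ⟨v, hv, rfl⟩)
    · exact ⟨h1, h2, le_of_lt h3, h4⟩
    · obtain ⟨hva, hvb⟩ := (pvKeysF_mem As v).mp hv
      exact ⟨hva, hva, le_refl _, by rwa [show v + v = v * 2 by ring]⟩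
  · rintro ⟨h1, h2, h3, h4⟩
    rcases lt_or_eq_of_le h3 with h | h
    · exact Or.inl ⟨h1, h2, h, h4⟩
    · refine Or.inr ⟨pr.1, (pvKeysF_mem As pr.1).mpr
        ⟨h1, by rw [show pr.1 * 2 = pr.1 + pr.2 by omega]; exact h4⟩, ?_⟩
      rw [← Prod.mk.eta (p := pr), ← h]

theorem pvKeysF_nodup (As : List Int) : (pvKeysF As).Nodup :=
  (pvKeysA_nodup As).filter _

theorem pvPairsA_nodup (As : List Int) : (pvPairsA As).Nodup := by
  rw [pvPairsA]
  refine List.Nodup.append (pvPairsOff_nodup As)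
    ((pvKeysF_nodup As).map (fun y z hyz => by simpa using hyz)) ?_
  intro pr hpr hpr2
  obtain ⟨v, _, rfl⟩ := List.mem_map.mp hpr2
  have := pvPairsOff_lt As _ hpr
  simp at this
theorem pvAllPows_nodup : pvAllPows.Nodup := by decide

theorem pvFlatMapPairs_nodup (ks : List Int) (g : Int → List (Int × Int))
    (hk : ks.Nodup) (hin : ∀ a, (g a).Nodup) (hfst : ∀ a pr, pr ∈ g a → pr.1 = a) :
    (ks.flatMap g).Nodup := by
  induction ks with
  | nil => simp
  | cons x t ih =>
    rw [List.flatMap_cons]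
    refine List.Nodup.append (hin x) (ih hk.of_cons) ?_
    intro pr hp1 hp2
    obtain ⟨a, hat, hpa⟩ := List.mem_flatMap.mp hp2
    have e1 := hfst x pr hp1
    have e2 := hfst a pr hpa
    exact (List.nodup_cons.mp hk).1 (by rw [← e1, e2]; exact hat)

theorem pvPairsB_eq_flatMap (As : List Int) :
    pvPairsB As = (pvKeysB As).flatMap (fun a =>
      (pvAllPows.filter (fun p =>
        decide (p - a ≥ a ∧ (PySem.Dict.counter As).contains (p - a) = true))).map
          (fun p => (a, p - a))) := by
  rw [pvPairsB]
  simp only [PySem.List.foldl_append_ite, PySem.List.foldl_append_eq_flatMap, List.nil_append]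

theorem pvKeysB_mem (As : List Int) (y : Int) : y ∈ pvKeysB As ↔ y ∈ As := by
  rw [pvKeysB_eq, PySem.List.mem_sorted, PySem.Set.mem_ofList]

theorem pvPairsB_mem (As : List Int) (pr : Int × Int) :
    pr ∈ pvPairsB As
      ↔ pr.1 ∈ As ∧ pr.2 ∈ As ∧ pr.1 ≤ pr.2 ∧ pr.1 + pr.2 ∈ pvAllPows := by
  rw [pvPairsB_eq_flatMap, List.mem_flatMap]
  constructor
  · rintro ⟨a, ha, hpr⟩
    obtain ⟨p, hp, rfl⟩ := List.mem_map.mp hpr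
    obtain ⟨hpmem, hcond⟩ := List.mem_filter.mp hp
    obtain ⟨hge, hcont⟩ := of_decide_eq_true hcond
    rw [PySem.Dict.contains_counter] at hcont
    refine ⟨(pvKeysB_mem As a).mp ha, List.contains_iff_mem.mp hcont, hge, ?_⟩
    simpa [show a + (p - a) = p by ring] using hpmem
  · rintro ⟨h1, h2, h3, h4⟩
    refine ⟨pr.1, (pvKeysB_mem As pr.1).mpr h1, List.mem_map.mpr
      ⟨pr.1 + pr.2, List.mem_filter.mpr ⟨h4, decide_eq_true ?_⟩, by
        rw [show pr.1 + pr.2 - pr.1 = pr.2 by ring]⟩⟩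
    constructor
    · omega
    · rw [PySem.Dict.contains_counter, show pr.1 + pr.2 - pr.1 = pr.2 by ring]
      exact List.contains_iff_mem.mpr h2

theorem pvPairsB_nodup (As : List Int) : (pvPairsB As).Nodup := by
  rw [pvPairsB_eq_flatMap]
  have hkeys : (pvKeysB As).Nodup := by
    rw [pvKeysB_eq]
    exact (PySem.List.sorted_ofList_pairwise_lt As).imp (fun h => ne_of_lt h)
  refine pvFlatMapPairs_nodup _ _ hkeys (fun a => ?_) (fun a pr hpr => ?_)
  · refine List.Nodup.map_on ?_ (pvAllPows_nodup.filter _)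
    intro p _ q _ hpq
    have := (Prod.mk.injEq ..).mp hpq
    omega
  · obtain ⟨p, _, rfl⟩ := List.mem_map.mp hpr
    rfl
-- ---- stage 5: the two candidate-pair lists are permutations, counters and costs agree ----

theorem pvPairs_perm (As : List Int) (hb : ∀ y ∈ As, -2147483648 ≤ y ∧ y ≤ 2147483648) :
    (pvPairsA As).Perm (pvPairsB As) := by
  rw [List.perm_ext_iff_of_nodup (pvPairsA_nodup As) (pvPairsB_nodup As)]
  intro pr
  rw [pvPairsA_mem, pvPairsB_mem]
  have hiff : pr.1 ∈ As → pr.2 ∈ As →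
      (PySem.Int.bitCount (pr.1 + pr.2) = 1 ↔ pr.1 + pr.2 ∈ pvAllPows) := by
    intro h1 h2
    refine pvBit_mem _ ?_
    have b1 := hb _ h1
    have b2 := hb _ h2
    have : (pr.1 + pr.2).natAbs ≤ 4294967296 := by omega
    simpa using this
  constructor
  · rintro ⟨h1, h2, h3, h4⟩
    exact ⟨h1, h2, h3, (hiff h1 h2).mp h4⟩
  · rintro ⟨h1, h2, h3, h4⟩
    exact ⟨h1, h2, h3, (hiff h1 h2).mpr h4⟩

def pvW (As : List Int) (x : Int) (pr : Int × Int) : Int :=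
  (if x = pr.1 then (As.count pr.1 : Int) else 0) +
  (if pr.2 ≠ pr.1 ∧ x = pr.2 then (As.count pr.2 : Int) else 0)

theorem pvCountersB_getD (As : List Int) (x : Int) :
    (pvCountersB As).getD x 0 = ((pvPairsB As).map (pvW As x)).sum := by
  rw [pvCountersB, pvUpdB_getD (fun y => (PySem.Dict.counter As).getD y 0)]
  simp only [PySem.Dict.getD_empty, PySem.Dict.getD_counter, zero_add]
  rfl

theorem pvCountersA_getD' (As : List Int) (x : Int) :
    (pvSt2 As).2.getD x 0 = ((pvPairsA As).map (pvW As x)).sum := by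
  rw [pvCountersA_getD, pvPairsA, List.map_append, List.sum_append]
  congr 1
  · refine congrArg List.sum (List.map_congr_left ?_)
    intro pr hpr
    have hlt := pvPairsOff_lt As pr hpr
    simp only [pvMA_eq, pvW]
    have hne : pr.2 ≠ pr.1 := by omega
    simp [hne]
  · rw [List.map_map]
    refine congrArg List.sum (List.map_congr_left ?_)
    intro v _
    simp only [Function.comp_apply, pvW, pvMA_eq]
    simp

theorem pvCounters_eq (As : List Int) (hb : ∀ y ∈ As, -2147483648 ≤ y ∧ y ≤ 2147483648)
    (x : Int) : (pvSt2 As).2.getD x 0 = (pvCountersB As).getD x 0 := by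
  rw [pvCountersA_getD' As x, pvCountersB_getD As x]
  exact ((pvPairs_perm As hb).map (pvW As x)).sum_eq

-- ---- stage 6: the cost lists are permutations, so the sorted lists coincide ----

def pvFA (As : List Int) (p : Int × Int) : Int × Int × Int :=
  ((if PySem.Int.bitCount p.1 ≠ 1 then (pvSt2 As).2.getD p.1 0 else 10000000000) +
   (if PySem.Int.bitCount p.2 ≠ 1 then (pvSt2 As).2.getD p.2 0 else 10000000000), p.1, p.2)

def pvFB (As : List Int) (pr : Int × Int) : Int × Int × Int :=
  ((if PySem.Set.contains (PySem.Set.ofList pvAllPows) pr.1 then 10000000000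
    else (pvCountersB As).getD pr.1 0) +
   (if PySem.Set.contains (PySem.Set.ofList pvAllPows) pr.2 then 10000000000
    else (pvCountersB As).getD pr.2 0), pr.1, pr.2)

theorem pvCostA_eq (As : List Int) : pvCostA As = (pvPairsA As).map (pvFA As) := by
  have h : pvCostA As = (pvSt2 As).1.foldl (fun acc p => acc ++ [pvFA As p]) [] := rfl
  rw [h, PySem.List.foldl_append_singleton_eq_map (pvFA As), pvSt2_fst]
  rfl

theorem pvCostB_eq (As : List Int) : pvCostB As = (pvPairsB As).map (pvFB As) := by
  rw [pvCostB]
  exact List.map_congr_left (fun pr _ => rfl)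

theorem pvF_congr (As : List Int) (hb : ∀ y ∈ As, -2147483648 ≤ y ∧ y ≤ 2147483648)
    (pr : Int × Int) (h1 : pr.1 ∈ As) (h2 : pr.2 ∈ As) : pvFA As pr = pvFB As pr := by
  have hbit : ∀ y ∈ As, (PySem.Int.bitCount y = 1
      ↔ PySem.Set.contains (PySem.Set.ofList pvAllPows) y = true) := by
    intro y hy
    have by1 := hb _ hy
    rw [PySem.Set.contains_iff, PySem.Set.mem_ofList]
    exact pvBit_mem y (by omega)
  rw [pvFA, pvFB]
  have e1 := pvCounters_eq As hb pr.1
  have e2 := pvCounters_eq As hb pr.2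
  have i1 := hbit _ h1
  have i2 := hbit _ h2
  refine congrArg₂ Prod.mk ?_ rfl
  refine congrArg₂ HAdd.hAdd ?_ ?_
  · by_cases hp : PySem.Int.bitCount pr.1 = 1
    · rw [if_neg (by simpa using hp), if_pos (i1.mp hp)]
    · rw [if_pos hp, if_neg (fun hc => hp (i1.mpr hc)), e1]
  · by_cases hp : PySem.Int.bitCount pr.2 = 1
    · rw [if_neg (by simpa using hp), if_pos (i2.mp hp)]
    · rw [if_pos hp, if_neg (fun hc => hp (i2.mpr hc)), e2]

theorem pvCost_perm (As : List Int) (hb : ∀ y ∈ As, -2147483648 ≤ y ∧ y ≤ 2147483648) :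
    (pvCostA As).Perm (pvCostB As) := by
  rw [pvCostA_eq, pvCostB_eq]
  have : (pvPairsA As).map (pvFA As) = (pvPairsA As).map (pvFB As) := by
    refine List.map_congr_left ?_
    intro pr hpr
    have hm := (pvPairsA_mem As pr).mp hpr
    exact pvF_congr As hb pr hm.1 hm.2.1
  rw [this]
  exact (pvPairs_perm As hb).map (pvFB As)

theorem pvKeyInj : Function.Injective (fun t : Int × Int × Int => toLex (t.1, toLex t.2)) := by
  intro x y h
  simp only [toLex_inj, Prod.mk.injEq] at h
  exact Prod.ext h.1 h.2

-- ===== VERDICT (by name: the statement is the Claim_ definition above) =====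
theorem solve_spec : Claim_equal_solve := by
  intro N As hdom
  have hb : ∀ y ∈ As, -2147483648 ≤ y ∧ y ≤ 2147483648 := by
    rw [Dom_solve, Bool.and_eq_true, List.all_eq_true] at hdom
    intro y hy
    exact of_decide_eq_true (hdom.2 y hy)
  unfold Spec_solve
  rw [solve_eq, solve_alt_eq,
    PySem.List.sorted_eq_sorted_of_perm (pvCostA As) (pvCostB As) _ pvKeyInj (pvCost_perm As hb)]
  exact pvFold_eq _ _ _ 0 (fun k => by rw [pvData_getD_len, PySem.Dict.getD_counter])
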